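-- pv_equiv track=rewrite | github.com/GeorgeFarrellx/PDF-Converter | core.py | find_duplicate_statements
-- ===== SOURCE A (Python) =====
-- def find_duplicate_statements(recon_results: list[dict]) -> list[list[dict]]:
--     fp_map: dict[str, list[dict]] = {}
--     for r in recon_results or []:
--         fp = r.get("fingerprint")
--         if not fp:
--             continue
--         fp_map.setdefault(fp, []).append(r)
--
--     return [grp for grp in fp_map.values() if len(grp) > 1]
-- ===== SOURCE B (Python) =====
-- def find_duplicate_statements(recon_results: list[dict]) -> list[list[dict]]:
--     # Nested-scan strategy: no grouping map. For each first occurrence of a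
--     # truthy fingerprint, rescan the list to collect its group.
--     def fp(r):
--         f = r.get("fingerprint")
--         return f if f else None
--
--     rs = recon_results or []
--     out = []
--     seen = set()
--     for r in rs:
--         f = fp(r)
--         if f is None or f in seen:
--             continue
--         seen.add(f)
--         grp = [s for s in rs if fp(s) == f]
--         if len(grp) > 1:
--             out.append(grp)
--     return out
-- ===== Notes on version B (the rewrite author's own statement) =====
-- stated objective: alternative
-- what changed: Replaced the dict-of-groups accumulation with a seen-set plus a per-distinct-fingerprint rescan of the input (nested scans, no grouping map), emitting each duplicate group at the first occurrence of its fingerprint.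
import Mathlib
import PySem

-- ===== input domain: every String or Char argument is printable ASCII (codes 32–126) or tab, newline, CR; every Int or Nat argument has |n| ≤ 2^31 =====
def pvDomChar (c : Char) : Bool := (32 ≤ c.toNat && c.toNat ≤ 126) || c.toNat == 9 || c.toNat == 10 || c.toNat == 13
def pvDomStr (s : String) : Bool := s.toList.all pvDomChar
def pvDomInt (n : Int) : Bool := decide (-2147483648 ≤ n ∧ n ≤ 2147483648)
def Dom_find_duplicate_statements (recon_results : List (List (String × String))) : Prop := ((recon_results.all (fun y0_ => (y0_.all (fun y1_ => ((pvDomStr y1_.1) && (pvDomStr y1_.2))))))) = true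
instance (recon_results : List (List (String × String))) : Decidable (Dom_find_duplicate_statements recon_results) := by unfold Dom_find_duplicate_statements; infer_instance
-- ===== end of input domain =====

-- B replaces A's dict-of-groups accumulation by a seen-set plus a rescan of the
-- input per distinct fingerprint (nested scans, no grouping map); same results.

-- ===== PORT A =====
def find_duplicate_statements (recon_results : List (List (String × String))) : List (List (List (String × String))) :=
  let fp_map : PySem.Dict String (List (List (String × String))) :=
    recon_results.foldl (fun fp_map r =>
      match (PySem.Dict.mk r).get? "fingerprint" with
      | none => fp_map
      | some fp => if fp = "" then fp_map else fp_map.modify fp [] (· ++ [r]))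
      PySem.Dict.empty
  fp_map.values.filter (fun grp => decide (1 < grp.length))

-- ===== PORT B =====
-- fp helper of Source B: truthy fingerprint or None
def pvFpB (r : List (String × String)) : Option String :=
  match (PySem.Dict.mk r).get? "fingerprint" with
  | none => none
  | some f => if f = "" then none else some f

def find_duplicate_statements_alt (recon_results : List (List (String × String))) : List (List (List (String × String))) :=
  let res :=
    recon_results.foldl (fun (acc : List (List (List (String × String))) × PySem.Set String) r =>
      match pvFpB r with
      | none => acc
      | some f =>
        if f ∈ acc.2 then acc
        else
          let grp := recon_results.filter (fun s => pvFpB s == some f)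
          (if 1 < grp.length then acc.1 ++ [grp] else acc.1, PySem.Set.add acc.2 f))
      ([], PySem.Set.empty)
  res.1

-- ===== PRECONDITION & SPEC =====
def Spec_find_duplicate_statements (recon_results : List (List (String × String))) (out : List (List (List (String × String)))) : Prop := out = find_duplicate_statements_alt recon_results
instance (recon_results : List (List (String × String))) (out : List (List (List (String × String)))) : Decidable (Spec_find_duplicate_statements recon_results out) := by unfold Spec_find_duplicate_statements; infer_instance

-- ===== CLAIM (what is proved, stated in full; the proofs are below) =====
def Claim_equal_find_duplicate_statements : Prop := ∀ (recon_results : List (List (String × String))), Dom_find_duplicate_statements recon_results → Spec_find_duplicate_statements recon_results (find_duplicate_statements recon_results)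

-- ===== LEMMAS AND PROOFS =====

-- each record keyed by its truthy fingerprint, records without one dropped
def pvKeyed (rs : List (List (String × String))) : List (String × List (String × String)) :=
  rs.filterMap (fun r => (pvFpB r).map (fun f => (f, r)))

-- the group of fingerprint f in rs
def pvGrp (rs : List (List (String × String))) (f : String) : List (List (String × String)) :=
  rs.filter (fun s => pvFpB s == some f)

-- common recursion both ports reduce to
def pvSpecLoop (rs : List (List (String × String))) (l : List String) (seen : PySem.Set String) : List (List (List (String × String))) :=
  match l with
  | [] => []
  | f :: fs =>
    if f ∈ seen then pvSpecLoop rs fs seen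
    else if 1 < (pvGrp rs f).length then pvGrp rs f :: pvSpecLoop rs fs (PySem.Set.add seen f)
    else pvSpecLoop rs fs (PySem.Set.add seen f)

theorem pvKeyed_cons (r : List (String × String)) (rs : List (List (String × String))) :
    pvKeyed (r :: rs) = match pvFpB r with
      | none => pvKeyed rs
      | some f => (f, r) :: pvKeyed rs := by
  simp only [pvKeyed, List.filterMap_cons]
  cases pvFpB r <;> simp

theorem pvFoldA_eq_keyed (rs : List (List (String × String)))
    (d : PySem.Dict String (List (List (String × String)))) :
    rs.foldl (fun fp_map r =>
      match (PySem.Dict.mk r).get? "fingerprint" with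
      | none => fp_map
      | some fp => if fp = "" then fp_map else fp_map.modify fp [] (· ++ [r])) d
    = (pvKeyed rs).foldl (fun d p => d.modify p.1 [] (· ++ [p.2])) d := by
  induction rs generalizing d with
  | nil => rfl
  | cons r rs ih =>
    rw [List.foldl_cons, pvKeyed_cons]
    unfold pvFpB
    cases h : (PySem.Dict.mk r).get? "fingerprint" with
    | none => simp [ih]
    | some f =>
      by_cases hf : f = "" <;> simp [hf, ih]

theorem pvGrp_eq_keyed_filter (rs : List (List (String × String))) (f : String) :
    ((pvKeyed rs).filter (fun p => p.1 == f)).map (·.2) = pvGrp rs f := by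
  induction rs with
  | nil => rfl
  | cons r rs ih =>
    rw [pvKeyed_cons]
    unfold pvGrp at *
    cases h : pvFpB r with
    | none => simp [h, ih]
    | some f' =>
      by_cases hf : f' = f
      · subst hf; simp [h, ih]
      · simp [h, hf, ih]

theorem pvFps_eq (rs : List (List (String × String))) :
    (pvKeyed rs).map (·.1) = rs.filterMap pvFpB := by
  induction rs with
  | nil => rfl
  | cons r rs ih =>
    rw [pvKeyed_cons]
    cases h : pvFpB r <;> simp [h, ih]

-- A-side closed form: the grouping dict's relevant values
theorem pvA_closed (rs : List (List (String × String))) :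
    find_duplicate_statements rs
    = ((PySem.Set.ofList (rs.filterMap pvFpB)).map (pvGrp rs)).filter
        (fun g => decide (1 < g.length)) := by
  unfold find_duplicate_statements
  rw [pvFoldA_eq_keyed]
  show (((pvKeyed rs).foldl (fun d p => d.modify p.1 [] (· ++ [p.2]))
      (PySem.Dict.empty : PySem.Dict String (List (List (String × String))))).values.filter
        (fun grp => decide (1 < grp.length))) = _
  have hnd : ((pvKeyed rs).foldl (fun d p => d.modify p.1 [] (· ++ [p.2]))
      (PySem.Dict.empty : PySem.Dict String (List (List (String × String))))).keys.Nodup := by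
    exact PySem.Dict.nodup_keys_foldl_modify_key _ _ _ _ _ List.nodup_nil
  rw [PySem.Dict.values_eq_map_keys _ hnd []]
  rw [PySem.Dict.keys_foldl_modify_key]
  simp only [PySem.Dict.keys_empty]
  rw [PySem.Set.update_nil_left, pvFps_eq]
  congr 1
  apply List.map_congr_left
  intro k _
  rw [PySem.Dict.getD_foldl_modify_append]
  simp [PySem.Dict.getD_empty, pvGrp_eq_keyed_filter]

-- B-side: the fold is specLoop over the fingerprint stream
theorem pvB_fold (rs l : List (List (String × String)))
    (acc : List (List (List (String × String)))) (seen : PySem.Set String) :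
    (l.foldl (fun (acc : List (List (List (String × String))) × PySem.Set String) r =>
      match pvFpB r with
      | none => acc
      | some f =>
        if f ∈ acc.2 then acc
        else
          let grp := rs.filter (fun s => pvFpB s == some f)
          (if 1 < grp.length then acc.1 ++ [grp] else acc.1, PySem.Set.add acc.2 f))
      (acc, seen)).1
    = acc ++ pvSpecLoop rs (l.filterMap pvFpB) seen := by
  induction l generalizing acc seen with
  | nil => simp [pvSpecLoop]
  | cons r l ih =>
    rw [List.foldl_cons, List.filterMap_cons]
    cases h : pvFpB r with
    | none => simp [ih]
    | some f =>
      simp only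
      by_cases hseen : f ∈ seen
      · simp [hseen, ih, pvSpecLoop]
      · by_cases hlen : 1 < (rs.filter (fun s => pvFpB s == some f)).length
        · simp [hseen, hlen, ih, pvSpecLoop, pvGrp]
        · simp [hseen, hlen, ih, pvSpecLoop, pvGrp]

-- A-side closed form equals specLoop
theorem pvSpecLoop_closed (rs : List (List (String × String))) (l : List String)
    (seen : PySem.Set String) :
    pvSpecLoop rs l seen
    = (((PySem.Set.update seen l).drop seen.length).map (pvGrp rs)).filter
        (fun g => decide (1 < g.length)) := by
  induction l generalizing seen with
  | nil => simp [pvSpecLoop, PySem.Set.update_nil]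
  | cons f fs ih =>
    rw [PySem.Set.update_cons]
    by_cases hseen : f ∈ seen
    · rw [PySem.Set.add_of_mem hseen]
      simp [pvSpecLoop, hseen, ih]
    · rw [PySem.Set.add_of_not_mem hseen]
      have hupd := PySem.Set.update_eq_append_filter (seen ++ [f]) fs
      have hdrop : (PySem.Set.update (seen ++ [f]) fs).drop seen.length
          = f :: (PySem.Set.update (seen ++ [f]) fs).drop (seen ++ [f]).length := by
        rw [hupd, List.append_assoc, List.drop_left, ← List.append_assoc, List.drop_left]
        simp
      have ih' : pvSpecLoop rs fs (PySem.Set.add seen f)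
          = (((PySem.Set.update (seen ++ [f]) fs).drop (seen ++ [f]).length).map (pvGrp rs)).filter
              (fun g => decide (1 < g.length)) := by
        rw [ih, PySem.Set.add_of_not_mem hseen]
      unfold pvSpecLoop
      rw [if_neg hseen, hdrop]
      simp only [List.map_cons, List.filter_cons]
      by_cases hlen : 1 < (pvGrp rs f).length
      · rw [if_pos hlen, ih']
        simp [hlen]
      · rw [if_neg hlen, ih']
        simp [hlen]

-- ===== VERDICT (by name: the statement is the Claim_ definition above) =====
theorem find_duplicate_statements_spec : Claim_equal_find_duplicate_statements := by
  intro rs _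
  unfold Spec_find_duplicate_statements
  rw [pvA_closed]
  unfold find_duplicate_statements_alt
  simp only
  rw [pvB_fold rs rs [] PySem.Set.empty]
  rw [pvSpecLoop_closed]
  simp [PySem.Set.empty, PySem.Set.update_nil_left]
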